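-- pv_equiv track=rewrite | github.com/cod2048/Algorithm_auto | 프로그래머스/0/181874. A 강조하기/A 강조하기.py | solution
-- ===== SOURCE A (Python) =====
-- def solution(myString):
--     answer = ''
--     for letter in myString:
--         if letter == "a" or letter == "A":
--             answer += "A"
--         else:
--             answer += letter.lower()
--     return answer
-- ===== SOURCE B (Python) =====
-- def solution(myString):
--     return myString.lower().replace('a', 'A')
-- ===== Notes on version B (the rewrite author's own statement) =====
-- stated objective: idiomatic
-- what changed: Replaces A's per-character conditional accumulation loop with two whole-string library passes: lowercase everything, then replace every lowercase-a with uppercase-A.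
import Mathlib
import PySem

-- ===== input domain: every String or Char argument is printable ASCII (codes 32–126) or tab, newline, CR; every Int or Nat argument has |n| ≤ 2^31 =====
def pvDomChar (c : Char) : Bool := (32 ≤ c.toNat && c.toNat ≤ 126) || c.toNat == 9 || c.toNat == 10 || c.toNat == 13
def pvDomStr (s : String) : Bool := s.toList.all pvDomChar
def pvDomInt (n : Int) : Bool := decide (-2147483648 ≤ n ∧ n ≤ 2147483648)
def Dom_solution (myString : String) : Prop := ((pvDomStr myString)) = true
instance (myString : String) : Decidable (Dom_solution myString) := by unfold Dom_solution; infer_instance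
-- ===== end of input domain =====

-- B replaces A's fused per-character conditional loop by two library passes (lower, then replace 'a'→'A'); idiomatic decomposition, same result.


-- ===== PORT A =====
-- answer = ''; for letter in myString: if letter == 'a' or letter == 'A': answer += 'A' else: answer += letter.lower()
def solution (myString : String) : String :=
  String.ofList (myString.toList.foldl
    (fun answer letter =>
      if letter = 'a' ∨ letter = 'A' then answer ++ ['A']
      else answer ++ [PySem.Chars.lowerChar letter]) [])

-- ===== PORT B =====
-- return myString.lower().replace('a', 'A')
def solution_alt (myString : String) : String :=
  PySem.Str.replace (PySem.Str.lower myString) "a" "A"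

-- ===== PRECONDITION & SPEC =====
def Spec_solution (myString : String) (out : String) : Prop := out = solution_alt myString
instance (myString : String) (out : String) : Decidable (Spec_solution myString out) := by unfold Spec_solution; infer_instance

-- ===== CLAIM (what is proved, stated in full; the proofs are below) =====
def Claim_equal_solution : Prop := ∀ (myString : String), Dom_solution myString → Spec_solution myString (solution myString)

-- ===== LEMMAS AND PROOFS =====

-- replace.go with single-char old 'a' is just a map
theorem replace_go_single (fuel : Nat) : ∀ (l acc : List Char), l.length ≤ fuel →
    PySem.Chars.replace.go ['a'] ['A'] fuel l acc
      = acc.reverse ++ l.map (fun c => if c = 'a' then 'A' else c) := by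
  induction fuel with
  | zero =>
    intro l acc h
    have : l = [] := List.eq_nil_of_length_eq_zero (Nat.le_zero.mp h)
    subst this
    simp [PySem.Chars.replace.go]
  | succ n ih =>
    intro l acc h
    cases l with
    | nil => simp [PySem.Chars.replace.go]
    | cons c t =>
      simp only [PySem.Chars.replace.go]
      by_cases hc : c = 'a'
      · subst hc
        rw [if_pos (by simp [List.isPrefixOf])]
        simp only [List.length_cons, List.length_nil, List.drop_succ_cons, List.drop_zero]
        rw [ih t _ (by simpa using Nat.le_of_succ_le_succ h)]
        simp
      · rw [if_neg (by simp [List.isPrefixOf]; exact fun h' => hc h'.symm)]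
        rw [ih t _ (by simpa using Nat.le_of_succ_le_succ h)]
        simp [hc]

theorem replace_single (s : List Char) :
    PySem.Chars.replace s ['a'] ['A'] = s.map (fun c => if c = 'a' then 'A' else c) := by
  simp only [PySem.Chars.replace, List.isEmpty_cons]
  rw [if_neg (by simp)]
  simpa using replace_go_single s.length s [] le_rfl

theorem lowerChar_eq_a (c : Char) : (PySem.Chars.lowerChar c = 'a') ↔ (c = 'a' ∨ c = 'A') := by
  constructor
  · intro h
    simp only [PySem.Chars.lowerChar, PySem.Chars.isupper] at h
    split_ifs at h with hu
    · right
      simp only [Bool.and_eq_true, decide_eq_true_eq, Char.le_def] at hu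
      have hb : 65 ≤ c.toNat ∧ c.toNat ≤ 90 := ⟨hu.1, hu.2⟩
      have hn : c.toNat + 32 = 97 := by
        have h2 := congrArg Char.toNat h
        rw [Char.toNat_ofNat, if_pos (Or.inl (by omega : c.toNat + 32 < 0xd800))] at h2
        simpa using h2
      have hc65 : c.toNat = 65 := by omega
      have := Char.ofNat_toNat c
      rw [hc65] at this
      exact this.symm
    · exact Or.inl h
  · rintro (h | h) <;> subst h <;> decide

theorem body_eq (c : Char) :
    (if PySem.Chars.lowerChar c = 'a' then 'A' else PySem.Chars.lowerChar c)
      = (if c = 'a' ∨ c = 'A' then 'A' else PySem.Chars.lowerChar c) := by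
  by_cases h : c = 'a' ∨ c = 'A'
  · rw [if_pos ((lowerChar_eq_a c).mpr h), if_pos h]
  · rw [if_neg (fun hl => h ((lowerChar_eq_a c).mp hl)), if_neg h]

theorem foldl_A (l : List Char) (acc : List Char) :
    l.foldl (fun answer letter =>
      if letter = 'a' ∨ letter = 'A' then answer ++ ['A']
      else answer ++ [PySem.Chars.lowerChar letter]) acc
    = acc ++ l.map (fun c => if c = 'a' ∨ c = 'A' then 'A' else PySem.Chars.lowerChar c) := by
  induction l generalizing acc with
  | nil => simp
  | cons c t ih =>
    simp only [List.foldl_cons, List.map_cons]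
    by_cases h : c = 'a' ∨ c = 'A'
    · rw [if_pos h, ih, if_pos h]; simp
    · rw [if_neg h, ih, if_neg h]; simp

-- ===== VERDICT (by name: the statement is the Claim_ definition above) =====
theorem solution_spec : Claim_equal_solution := by
  intro s _
  unfold Spec_solution solution solution_alt
  apply String.ext
  rw [foldl_A]
  rw [PySem.Str.toList_replace, PySem.Str.toList_lower]
  rw [show ("a" : String).toList = ['a'] from rfl, show ("A" : String).toList = ['A'] from rfl]
  rw [replace_single]
  simp only [PySem.Chars.lower, List.map_map, String.toList_ofList, List.nil_append]
  apply List.map_congr_left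
  intro c _
  exact (body_eq c).symm
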